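-- pv_equiv track=rewrite | github.com/ritujadik/DSA-Problem | Jul_2025/Array/July_Second_Week/July_Third_Week/21.07.25/k_substring_vowels.py | k_substring_vowel
-- ===== SOURCE A (Python) =====
-- def k_substring_vowel(x,k):
--     n = len(x)
--     x_new = set('aeiou')
--     new_list = []
--
--     count = sum(1 for i in range(k) if x[i] in x_new)
--     new_list.append(count)
--
--     for i in range(1,n-k+1):
--         if x[i-1] in x_new:
--             count-=1
--         if x[i+k-1] in x_new:
--             count+=1
--         new_list.append(count)
--     return new_list
--
-- x = "workattech"
--
-- k = 2
-- ===== SOURCE B (Python) =====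
-- def k_substring_vowel(x, k):
--     # Prefix-count table: prefix[j] = number of vowels among x[:j];
--     # each window count is an O(1) range difference prefix[i+k] - prefix[i].
--     prefix = [0]
--     total = 0
--     for ch in x:
--         if ch in 'aeiou':
--             total += 1
--         prefix.append(total)
--     return [prefix[i + k] - prefix[i] for i in range(len(x) - k + 1)]
-- ===== Notes on version B (the rewrite author's own statement) =====
-- stated objective: alternative
-- what changed: Replaces the incremental add/remove sliding-window loop with a once-built prefix-count table followed by O(1) range-difference queries per window.
import Mathlib
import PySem

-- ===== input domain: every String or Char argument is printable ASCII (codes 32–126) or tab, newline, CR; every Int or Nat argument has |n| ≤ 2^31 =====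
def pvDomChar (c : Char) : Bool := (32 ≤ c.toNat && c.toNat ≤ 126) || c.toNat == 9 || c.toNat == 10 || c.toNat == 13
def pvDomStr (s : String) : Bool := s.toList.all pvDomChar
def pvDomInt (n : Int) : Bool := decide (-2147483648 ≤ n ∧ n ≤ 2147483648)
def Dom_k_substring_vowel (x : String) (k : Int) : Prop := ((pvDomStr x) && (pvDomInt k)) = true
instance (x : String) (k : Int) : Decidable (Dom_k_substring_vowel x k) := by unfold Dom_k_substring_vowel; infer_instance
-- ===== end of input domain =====

-- B replaces A's incremental sliding-window update with a prefix-count table and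
-- per-window range differences (alternative decomposition, same O(n) cost).


-- ===== PORT A =====
-- x_new = set('aeiou')
def pvVowelSet : PySem.Set Char := PySem.Set.ofList "aeiou".toList

def k_substring_vowel (x : String) (k : Int) : List Int :=
  let n : Int := PySem.Str.len x
  -- count = sum(1 for i in range(k) if x[i] in x_new)   (x[i] out of range = IndexError → none, defaulted; excluded by Pre_)
  let count0 : Int :=
    ((PySem.List.pyRange 0 k 1).map (fun i =>
      if pvVowelSet.contains ((PySem.Str.pyGet? x i).getD ' ') then (1 : Int) else 0)).sum
  -- for i in range(1, n-k+1): … ; new_list.append(count)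
  ((PySem.List.pyRange 1 (n - k + 1) 1).foldl (fun (st : List Int × Int) i =>
      let c1 := if pvVowelSet.contains ((PySem.Str.pyGet? x (i - 1)).getD ' ') then st.2 - 1 else st.2
      let c2 := if pvVowelSet.contains ((PySem.Str.pyGet? x (i + k - 1)).getD ' ') then c1 + 1 else c1
      (st.1 ++ [c2], c2)) ([count0], count0)).1

-- ===== PORT B =====
def k_substring_vowel_alt (x : String) (k : Int) : List Int :=
  -- build the prefix table: prefix[j] = number of vowels among x[:j]
  -- ('ch in "aeiou"' on a single char is exactly membership of that char)
  let st := x.toList.foldl (fun (st : List Int × Int) ch =>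
      let t := if ch ∈ "aeiou".toList then st.2 + 1 else st.2
      (st.1 ++ [t], t)) (([0] : List Int), (0 : Int))
  let pre := st.1
  -- [prefix[i+k] - prefix[i] for i in range(len(x)-k+1)]  (IndexError → none, defaulted; excluded by Pre_)
  (PySem.List.pyRange 0 (PySem.Str.len x - k + 1) 1).map (fun i =>
    (PySem.List.pyGet? pre (i + k)).getD 0 - (PySem.List.pyGet? pre i).getD 0)

-- ===== PRECONDITION & SPEC =====
-- A raises IndexError whenever k < 0 or k > len(x); it returns exactly on 0 ≤ k ≤ len(x).
def Pre_k_substring_vowel (x : String) (k : Int) : Prop :=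
  0 ≤ k ∧ k ≤ (x.toList.length : Int)
instance (x : String) (k : Int) : Decidable (Pre_k_substring_vowel x k) := by
  unfold Pre_k_substring_vowel; infer_instance

def pvWitness_k_substring_vowel : String × Int := ("workattech", 2)

def Spec_k_substring_vowel (x : String) (k : Int) (out : List Int) : Prop := out = k_substring_vowel_alt x k
instance (x : String) (k : Int) (out : List Int) : Decidable (Spec_k_substring_vowel x k out) := by unfold Spec_k_substring_vowel; infer_instance

-- ===== CLAIM (what is proved, stated in full; the proofs are below) =====
def Claim_equal_k_substring_vowel : Prop := ∀ (x : String) (k : Int), Dom_k_substring_vowel x k → Pre_k_substring_vowel x k → Spec_k_substring_vowel x k (k_substring_vowel x k)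

-- ===== LEMMAS AND PROOFS =====

-- vowel test in list form
def pvV (c : Char) : Bool := decide (c ∈ "aeiou".toList)

-- prefix count: vowels among the first j characters
def pvP (cs : List Char) (j : Nat) : Int := ((cs.take j).countP pvV : Int)

-- window count for the window of length kn starting at i
def pvW (cs : List Char) (kn i : Nat) : Int := pvP cs (i + kn) - pvP cs i

theorem pvVowelSet_contains (c : Char) : pvVowelSet.contains c = pvV c := by
  simp [pvVowelSet, pvV, PySem.Set.contains, PySem.Set.ofList]

theorem pvP_succ (cs : List Char) (j : Nat) (h : j < cs.length) :
    pvP cs (j + 1) = pvP cs j + (if pvV (cs[j]'h) then 1 else 0) := by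
  simp only [pvP, List.take_add_one, List.getElem?_eq_getElem h, Option.toList_some,
    List.countP_append, List.countP_cons, List.countP_nil]
  split <;> simp

theorem pvGet_str (x : String) (j : Nat) (h : j < x.toList.length) :
    (PySem.Str.pyGet? x (j : Int)).getD ' ' = x.toList[j]'h := by
  simp [PySem.Str.pyGet?, PySem.Chars.pyGet?, PySem.List.pyGet?_natCast, List.getElem?_eq_getElem h]

-- A's initial count over range(k)
theorem pv_count0 (x : String) (m : Nat) (h : m ≤ x.toList.length) :
    ((PySem.List.pyRange 0 (m : Int) 1).map (fun i =>
      if pvVowelSet.contains ((PySem.Str.pyGet? x i).getD ' ') then (1 : Int) else 0)).sum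
    = pvP x.toList m := by
  induction m with
  | zero => simp [PySem.List.pyRange_one_eq_nil, pvP]
  | succ m ih =>
    rw [Nat.cast_add, Nat.cast_one, PySem.List.pyRange_one_succ_right (by positivity)]
    rw [List.map_append, List.sum_append, ih (by omega)]
    rw [pvP_succ _ m (by omega)]
    have := pvGet_str x m (by omega)
    simp only [List.map_cons, List.map_nil, List.sum_cons, List.sum_nil, add_zero, this,
      pvVowelSet_contains]

-- B's prefix-building loop, generalized over the accumulator
theorem pv_prefix_fold (cs : List Char) (acc : List Int) (t : Int) :
    cs.foldl (fun (st : List Int × Int) ch =>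
        let t' := if ch ∈ "aeiou".toList then st.2 + 1 else st.2
        (st.1 ++ [t'], t')) (acc, t)
    = (acc ++ (List.range cs.length).map (fun j => t + pvP cs (j + 1)), t + pvP cs cs.length) := by
  induction cs generalizing acc t with
  | nil => simp [pvP]
  | cons c cs ih =>
    have hstep : ∀ j, pvP (c :: cs) (j + 1) = (if pvV c then 1 else 0) + pvP cs j := by
      intro j
      simp only [pvP, List.take_succ_cons, List.countP_cons, pvV]
      split <;> simp <;> push_cast <;> ring
    have hc : (if c ∈ "aeiou".toList then t + 1 else t) = t + (if pvV c then 1 else 0) := by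
      simp only [pvV]; split <;> simp_all
    simp only [List.foldl_cons, ih]
    rw [List.length_cons, List.range_succ_eq_map, List.map_cons, List.map_map]
    refine Prod.ext ?_ ?_
    · show acc ++ [_] ++ _ = acc ++ (_ :: _)
      rw [List.append_assoc]
      congr 1
      rw [List.singleton_append]
      congr 1
      · rw [hc, hstep 0]
        simp [pvP]
      · apply List.map_congr_left
        intro j _
        simp only [Function.comp, Nat.succ_eq_add_one, hstep (j + 1), hc]
        ring
    · show (if c ∈ "aeiou".toList then t + 1 else t) + pvP cs cs.length = t + pvP (c :: cs) (cs.length + 1)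
      rw [hc, hstep]
      ring

-- one sliding-window update equals the next window count
theorem pv_window_step (cs : List Char) (kn m : Nat)
    (hm : m < cs.length) (hmk : m + kn < cs.length) :
    pvW cs kn (m + 1) =
      (if pvV (cs[m + kn]'hmk)
        then (if pvV (cs[m]'hm) then pvW cs kn m - 1 else pvW cs kn m) + 1
        else (if pvV (cs[m]'hm) then pvW cs kn m - 1 else pvW cs kn m)) := by
  have h1 : pvP cs (m + 1 + kn) = pvP cs (m + kn) + (if pvV (cs[m + kn]'hmk) then 1 else 0) := by
    have := pvP_succ cs (m + kn) hmk
    rw [show m + 1 + kn = m + kn + 1 by omega, this]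
  have h2 := pvP_succ cs m hm
  simp only [pvW, h1, h2]
  split <;> split <;> ring

-- A's main loop, by induction on the number of processed windows
theorem pv_loop (x : String) (kn m : Nat) (h : m + kn ≤ x.toList.length) :
    (PySem.List.pyRange 1 ((m : Int) + 1) 1).foldl (fun (st : List Int × Int) i =>
      let c1 := if pvVowelSet.contains ((PySem.Str.pyGet? x (i - 1)).getD ' ') then st.2 - 1 else st.2
      let c2 := if pvVowelSet.contains ((PySem.Str.pyGet? x (i + (kn : Int) - 1)).getD ' ') then c1 + 1 else c1
      (st.1 ++ [c2], c2)) ([pvW x.toList kn 0], pvW x.toList kn 0)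
    = ((List.range (m + 1)).map (fun i => pvW x.toList kn i), pvW x.toList kn m) := by
  induction m with
  | zero => simp [PySem.List.pyRange_one_eq_nil]
  | succ m ih =>
    rw [show ((m + 1 : Nat) : Int) + 1 = (((m : Int) + 1) + 1) by push_cast; ring,
        PySem.List.pyRange_one_succ_right (by omega), List.foldl_append, ih (by omega)]
    simp only [List.foldl_cons, List.foldl_nil]
    have e1 : ((m : Int) + 1 - 1) = ((m : Nat) : Int) := by push_cast; ring
    have e2 : ((m : Int) + 1 + (kn : Int) - 1) = (((m + kn : Nat)) : Int) := by push_cast; ring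
    have g1 := pvGet_str x m (by omega)
    have g2 := pvGet_str x (m + kn) (by omega)
    simp only [e1, e2, g1, g2, pvVowelSet_contains]
    have hw := pv_window_step x.toList kn m (by omega) (by omega)
    rw [← hw]
    refine Prod.ext ?_ ?_ <;> simp [List.range_succ]

-- A computes the list of window counts
theorem pv_A_eq (x : String) (k : Int) (hp : Pre_k_substring_vowel x k) :
    k_substring_vowel x k =
      (List.range (x.toList.length - k.toNat + 1)).map (fun i => pvW x.toList k.toNat i) := by
  obtain ⟨h0, hn⟩ := hp
  set kn := k.toNat with hkn
  have hk : k = (kn : Int) := by omega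
  have hkle : kn ≤ x.toList.length := by omega
  unfold k_substring_vowel
  simp only [PySem.Str.len]
  rw [hk, pv_count0 x kn hkle]
  have hcnt : pvP x.toList kn = pvW x.toList kn 0 := by simp [pvW, pvP]
  rw [hcnt]
  have hub : ((x.toList.length : Int) - (kn : Int) + 1) = (((x.toList.length - kn : Nat)) : Int) + 1 := by
    omega
  rw [hub, pv_loop x kn (x.toList.length - kn) (by omega)]

-- B computes the same list of window counts
theorem pv_B_eq (x : String) (k : Int) (hp : Pre_k_substring_vowel x k) :
    k_substring_vowel_alt x k =
      (List.range (x.toList.length - k.toNat + 1)).map (fun i => pvW x.toList k.toNat i) := by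
  obtain ⟨h0, hn⟩ := hp
  set kn := k.toNat with hkn
  have hk : k = (kn : Int) := by omega
  have hkle : kn ≤ x.toList.length := by omega
  unfold k_substring_vowel_alt
  simp only [PySem.Str.len]
  rw [pv_prefix_fold]
  set n := x.toList.length with hn'
  have hpre : (([0] : List Int) ++ (List.range n).map (fun j => 0 + pvP x.toList (j + 1)))
      = (List.range (n + 1)).map (fun j => pvP x.toList j) := by
    rw [List.range_succ_eq_map, List.map_cons, List.map_map]
    simp [pvP]
  rw [hpre]
  have hget : ∀ j : Nat, j ≤ n →
      (PySem.List.pyGet? ((List.range (n + 1)).map (fun j => pvP x.toList j)) (j : Int)).getD 0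
        = pvP x.toList j := by
    intro j hj
    rw [PySem.List.pyGet?_natCast]
    simp [List.getElem?_map, List.getElem?_range (by omega : j < n + 1)]
  rw [hk]
  have hub : ((n : Int) - (kn : Int) + 1) = ((n - kn + 1 : Nat) : Int) := by omega
  rw [hub, PySem.List.pyRange_zero_natCast, List.map_map]
  apply List.map_congr_left
  intro i hi
  have hilt : i < n - kn + 1 := List.mem_range.mp hi
  have e : ((i : Int) + (kn : Int)) = ((i + kn : Nat) : Int) := by push_cast; ring
  simp only [Function.comp, e]
  rw [hget (i + kn) (by omega), hget i (by omega)]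
  rfl

-- ===== VERDICT (by name: the statement is the Claim_ definition above) =====
theorem k_substring_vowel_spec : Claim_equal_k_substring_vowel := by
  intro x k _ hp
  unfold Spec_k_substring_vowel
  rw [pv_A_eq x k hp, pv_B_eq x k hp]
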